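-- pv_equiv track=rewrite | github.com/udjapanese/cabocha2ud | cabocha2ud/lib/iterate_function.py | iterate_bunsetu
-- ===== SOURCE A (Python) =====
-- from typing import Iterator, Optional, Union
--
-- def iterate_bunsetu(lines: list[str]) -> Iterator[list[str]]:
--     """
--         iterate bunsetu
--     """
--     if not lines[0].startswith("* "):
--         raise TypeError("parse Error: first line must be `* `")
--     sent = [lines[0]]
--     for line in lines[1:]:
--         if line.startswith("* "):
--             yield sent
--             sent = [line]
--         else:
--             sent.append(line)
--     yield sent
-- ===== SOURCE B (Python) =====
-- def iterate_bunsetu(lines):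
--     """
--         iterate bunsetu
--     """
--     if not lines[0].startswith("* "):
--         raise TypeError("parse Error: first line must be `* `")
--     rest = lines[1:]
--     k = 0
--     while k < len(rest) and not rest[k].startswith("* "):
--         k += 1
--     yield [lines[0]] + rest[:k]
--     if k < len(rest):
--         yield from iterate_bunsetu(rest[k:])
-- ===== Notes on version B (the rewrite author's own statement) =====
-- stated objective: alternative
-- what changed: Replaced the accumulate-and-flush streaming loop by a recursive decomposition: scan forward to the next '* ' boundary, yield the slice up to it, and recurse on the remainder.
-- outside the precondition, e.g. on iterate_bunsetu([]): A raises IndexError, B raises IndexError; on iterate_bunsetu(['x']): A raises TypeError, B raises TypeError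
import Mathlib
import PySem

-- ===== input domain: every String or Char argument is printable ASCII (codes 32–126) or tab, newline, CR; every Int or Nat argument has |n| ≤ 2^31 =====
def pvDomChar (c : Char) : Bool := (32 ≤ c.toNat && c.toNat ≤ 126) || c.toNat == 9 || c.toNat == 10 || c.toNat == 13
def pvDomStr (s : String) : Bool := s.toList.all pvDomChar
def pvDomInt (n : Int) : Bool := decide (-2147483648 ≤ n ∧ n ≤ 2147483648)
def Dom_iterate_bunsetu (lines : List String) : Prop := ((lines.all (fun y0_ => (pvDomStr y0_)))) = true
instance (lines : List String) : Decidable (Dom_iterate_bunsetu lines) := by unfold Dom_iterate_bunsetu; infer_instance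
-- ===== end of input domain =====

-- B replaces A's accumulate-and-flush loop by boundary-scan-then-slice recursion; return-value equivalence (the Python versions are generators, compared as the list of yielded groups).

-- ===== PORT A =====
-- A: flag check on lines[0], then stream lines[1:] flushing the accumulator `sent` at each '* ' line.
def iterate_bunsetu (lines : List String) : List (List String) :=
  match lines with
  | [] => []  -- lines[0] raises IndexError; excluded by Pre_
  | l0 :: rest =>
    if PySem.Str.startswith l0 "* " = false then []  -- raise TypeError; excluded by Pre_
    else
      let st := rest.foldl
        (fun (st : List (List String) × List String) line =>
          if PySem.Str.startswith line "* " then (st.1 ++ [st.2], [line])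
          else (st.1, st.2 ++ [line]))
        ([], [l0])
      st.1 ++ [st.2]

-- ===== PORT B =====
-- B: the while loop computing k (the count of leading non-'* ' lines of rest) and the
-- slices rest[:k] / rest[k:] are ported as takeWhile / dropWhile on the same predicate.
def iterate_bunsetu_alt (lines : List String) : List (List String) :=
  match lines with
  | [] => []  -- lines[0] raises IndexError; excluded by Pre_
  | l0 :: rest =>
    if PySem.Str.startswith l0 "* " = false then []  -- raise TypeError; excluded by Pre_
    else
      let pre := rest.takeWhile (fun l => !PySem.Str.startswith l "* ")
      let post := rest.dropWhile (fun l => !PySem.Str.startswith l "* ")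
      (l0 :: pre) :: (if post.isEmpty then [] else iterate_bunsetu_alt post)
termination_by lines.length
decreasing_by
  simp only [List.length_cons]
  exact Nat.lt_succ_of_le (List.length_dropWhile_le _ _)

-- ===== PRECONDITION & SPEC =====
-- Pre_ excludes exactly the inputs where A raises: the empty list (IndexError) and a
-- first line not starting with "* " (TypeError); note startswith "" "* " = false covers [].
def Pre_iterate_bunsetu (lines : List String) : Prop :=
  PySem.Str.startswith lines.headI "* " = true
instance (lines : List String) : Decidable (Pre_iterate_bunsetu lines) := by
  unfold Pre_iterate_bunsetu; infer_instance
def pvWitness_iterate_bunsetu : List String := ["* 1 2", "word", "* 3", "x"]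
def Spec_iterate_bunsetu (lines : List String) (out : List (List String)) : Prop := out = iterate_bunsetu_alt lines
instance (lines : List String) (out : List (List String)) : Decidable (Spec_iterate_bunsetu lines out) := by unfold Spec_iterate_bunsetu; infer_instance

-- ===== CLAIM (what is proved, stated in full; the proofs are below) =====
def Claim_equal_iterate_bunsetu : Prop := ∀ (lines : List String), Dom_iterate_bunsetu lines → Pre_iterate_bunsetu lines → Spec_iterate_bunsetu lines (iterate_bunsetu lines)

-- ===== LEMMAS AND PROOFS =====

-- recursive characterisation of A's accumulate-and-flush loop
def groupsAux (sent : List String) : List String → List (List String)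
  | [] => [sent]
  | l :: rest =>
    if PySem.Str.startswith l "* " then sent :: groupsAux [l] rest
    else groupsAux (sent ++ [l]) rest

theorem foldl_eq_groupsAux (rest : List String) :
    ∀ (out : List (List String)) (sent : List String),
    (let st := rest.foldl
        (fun (st : List (List String) × List String) line =>
          if PySem.Str.startswith line "* " then (st.1 ++ [st.2], [line])
          else (st.1, st.2 ++ [line]))
        (out, sent)
     st.1 ++ [st.2]) = out ++ groupsAux sent rest := by
  induction rest with
  | nil => intro out sent; simp [groupsAux]
  | cons l rest ih =>
    intro out sent
    simp only [List.foldl_cons, groupsAux]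
    by_cases h : PySem.Str.startswith l "* " = true
    · rw [if_pos h, if_pos h, ih]
      simp
    · rw [if_neg h, if_neg h, ih]

theorem groupsAux_skip (pre : List String) :
    ∀ (post : List String) (sent : List String),
    (∀ l ∈ pre, PySem.Str.startswith l "* " = false) →
    groupsAux sent (pre ++ post) = groupsAux (sent ++ pre) post := by
  induction pre with
  | nil => intro post sent _; simp
  | cons a pre ih =>
    intro post sent h
    have ha : PySem.Str.startswith a "* " = false := h a (by simp)
    simp only [List.cons_append, groupsAux, ha, Bool.false_eq_true, if_false]
    rw [ih post (sent ++ [a]) (fun l hl => h l (by simp [hl]))]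
    simp

theorem dropWhile_head_not {α : Type} (p : α → Bool) :
    ∀ (l : List α) (b : α) (r : List α), l.dropWhile p = b :: r → p b = false := by
  intro l
  induction l with
  | nil => intro b r h; simp [List.dropWhile] at h
  | cons a l ih =>
    intro b r h
    by_cases ha : p a = true
    · rw [List.dropWhile_cons_of_pos ha] at h; exact ih b r h
    · rw [List.dropWhile_cons_of_neg (by simp [ha])] at h
      cases h
      simpa using ha

theorem groupsAux_alt (rest : List String) (l0 : String)
    (h : PySem.Str.startswith l0 "* " = true) :
    groupsAux [l0] rest = iterate_bunsetu_alt (l0 :: rest) := by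
  have hpre : ∀ l ∈ rest.takeWhile (fun l => !PySem.Str.startswith l "* "),
      PySem.Str.startswith l "* " = false := by
    intro l hl
    have := List.mem_takeWhile_imp hl
    simpa using this
  have hsplit := List.takeWhile_append_dropWhile
    (p := fun l => !PySem.Str.startswith l "* ") (l := rest)
  have hmain : groupsAux [l0] rest =
      groupsAux (l0 :: rest.takeWhile (fun l => !PySem.Str.startswith l "* "))
        (rest.dropWhile (fun l => !PySem.Str.startswith l "* ")) := by
    conv_lhs => rw [← hsplit]
    rw [groupsAux_skip _ _ _ hpre]
    simp
  rw [hmain]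
  rw [iterate_bunsetu_alt]
  simp only [h, Bool.true_eq_false, if_false]
  cases hpost : rest.dropWhile (fun l => !PySem.Str.startswith l "* ") with
  | nil => simp [groupsAux]
  | cons b r =>
    have hb : PySem.Str.startswith b "* " = true := by
      have := dropWhile_head_not (fun l => !PySem.Str.startswith l "* ") rest b r hpost
      simpa using this
    have hlt : r.length < rest.length := by
      have : (rest.takeWhile (fun l => !PySem.Str.startswith l "* ")).length + (b :: r).length = rest.length := by
        rw [← hpost, ← List.length_append, hsplit]
      simp only [List.length_cons] at this
      omega
    simp only [groupsAux, hb, if_true, List.isEmpty_cons]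
    rw [groupsAux_alt r b hb]
    simp
termination_by rest.length

-- ===== VERDICT (by name: the statement is the Claim_ definition above) =====
theorem iterate_bunsetu_spec : Claim_equal_iterate_bunsetu := by
  intro lines _ hpre
  unfold Spec_iterate_bunsetu
  cases lines with
  | nil =>
    exfalso
    unfold Pre_iterate_bunsetu at hpre
    simp only [List.headI] at hpre
    exact absurd hpre (by decide)
  | cons l0 rest =>
    unfold Pre_iterate_bunsetu at hpre
    simp only [List.headI] at hpre
    rw [iterate_bunsetu]
    simp only [hpre, Bool.true_eq_false, if_false]
    rw [foldl_eq_groupsAux rest [] [l0], List.nil_append]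
    exact groupsAux_alt rest l0 hpre
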